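-- pv_equiv track=rewrite | github.com/pypi-data/pypi-mirror-403 | packages/maptasker/maptasker-10.0.5-py3-none-any.whl/maptasker/src/maputils.py | count_consecutive_substr
-- ===== SOURCE A (Python) =====
-- def count_consecutive_substr(main_str: str, substr: str) -> int:
--     """
--     Count the maximum consecutive occurrences of 'substr' inside 'main_str'.
--     Highly optimized: performs a single linear scan with no repeated .find() calls.
--     """
--     if not main_str or not substr:
--         return 0
--
--     sub_len = len(substr)
--     max_count = 0
--     count = 0
--
--     i = 0
--     end = len(main_str)
--
--     while i <= end - sub_len:
--         # Direct substring match without slicing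
--         if main_str.startswith(substr, i):
--             count += 1
--             i += sub_len
--         else:
--             max_count = max(max_count, count)
--             count = 0
--             i += 1
--
--     return max(max_count, count)
-- ===== SOURCE B (Python) =====
-- def count_consecutive_substr(main_str: str, substr: str) -> int:
--     """Max consecutive non-overlapping occurrences of substr, driven by str.find."""
--     if not main_str or not substr:
--         return 0
--     best = 0
--     step = len(substr)
--     i = main_str.find(substr)
--     while i != -1:
--         count = 0
--         while main_str.startswith(substr, i):
--             count += 1
--             i += step
--         best = max(best, count)
--         i = main_str.find(substr, i)
--     return best
-- ===== Notes on version B (the rewrite author's own statement) =====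
-- stated objective: idiomatic
-- what changed: Replaces A's single position-by-position index scan with reset-on-mismatch state by an idiomatic find-driven outer loop that jumps between occurrences and an inner startswith loop that extends each back-to-back run.
import Mathlib
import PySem

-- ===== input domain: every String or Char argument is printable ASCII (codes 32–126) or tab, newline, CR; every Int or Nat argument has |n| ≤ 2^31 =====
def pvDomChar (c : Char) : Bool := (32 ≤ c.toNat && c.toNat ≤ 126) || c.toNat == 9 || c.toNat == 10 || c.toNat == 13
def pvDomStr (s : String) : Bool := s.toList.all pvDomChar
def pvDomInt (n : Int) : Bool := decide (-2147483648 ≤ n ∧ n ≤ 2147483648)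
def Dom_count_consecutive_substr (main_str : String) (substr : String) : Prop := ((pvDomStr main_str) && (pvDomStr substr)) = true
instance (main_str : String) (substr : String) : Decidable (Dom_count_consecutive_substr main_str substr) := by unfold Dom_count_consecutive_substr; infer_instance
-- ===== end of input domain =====

-- B replaces A's position-by-position scan with an idiomatic find-driven outer loop plus a
-- run-extension inner loop (objective: idiomatic decomposition; same asymptotic cost).
-- Both while loops are ported with a fuel of length+1, which provably never runs out
-- (every iteration advances the scan index by at least 1).

-- ===== PORT A =====
-- main_str.startswith(substr, i) with 0 ≤ i is exactly substr.toList.isPrefixOf (toList.drop i).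
-- Python's int guard 'i <= end - sub_len' is, for Nat i, exactly 'i + sub_len ≤ end'
-- (when end - sub_len < 0 both sides are false for every i ≥ 0).
-- fuel = l.length + 1 at the call site; each iteration increases i, so fuel never runs out
def loopA (l sub : List Char) : Nat → Nat → Nat → Nat → Nat
  | 0, _, maxc, cnt => Nat.max maxc cnt
  | fuel + 1, i, maxc, cnt =>
    if i + sub.length ≤ l.length then
      if sub.isPrefixOf (l.drop i) then
        loopA l sub fuel (i + sub.length) maxc (cnt + 1)
      else
        loopA l sub fuel (i + 1) (Nat.max maxc cnt) 0
    else
      Nat.max maxc cnt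

def count_consecutive_substr (main_str : String) (substr : String) : Int :=
  if main_str.toList = [] ∨ substr.toList = [] then 0
  else ((loopA main_str.toList substr.toList (main_str.toList.length + 1) 0 0 0 : Nat) : Int)

-- ===== PORT B =====
-- main_str.find(substr, j) for nonempty substr and 0 ≤ j: first position p ≥ j where substr
-- matches, none for Python's -1 (exact: a nonempty substr never matches at p > len - len(substr)).
-- fuel = l.length + 1 at the call sites; j increases each step, so fuel never runs out
def findFrom (l sub : List Char) : Nat → Nat → Option Nat
  | 0, _ => none
  | fuel + 1, j =>
    if j + sub.length ≤ l.length then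
      if sub.isPrefixOf (l.drop j) then some j else findFrom l sub fuel (j + 1)
    else
      none

-- the inner 'while main_str.startswith(substr, i): count += 1; i += step' loop of B;
-- returns the final (count, i); fuel = l.length + 1, i increases each step
def runB (l sub : List Char) : Nat → Nat → Nat → Nat × Nat
  | 0, i, cnt => (cnt, i)
  | fuel + 1, i, cnt =>
    if sub.isPrefixOf (l.drop i) then
      runB l sub fuel (i + sub.length) (cnt + 1)
    else
      (cnt, i)

-- the outer 'while i != -1' loop of B; Python's i = -1 is the none case;
-- fuel = l.length + 1, the match position strictly increases each iteration
def outerB (l sub : List Char) : Nat → Option Nat → Nat → Nat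
  | 0, _, best => best
  | _ + 1, none, best => best
  | fuel + 1, some p, best =>
    let r := runB l sub (l.length + 1) p 0
    outerB l sub fuel (findFrom l sub (l.length + 1) r.2) (Nat.max best r.1)

def count_consecutive_substr_alt (main_str : String) (substr : String) : Int :=
  if main_str.toList = [] ∨ substr.toList = [] then 0
  else
    ((outerB main_str.toList substr.toList (main_str.toList.length + 1)
      (findFrom main_str.toList substr.toList (main_str.toList.length + 1) 0) 0 : Nat) : Int)

-- ===== PRECONDITION & SPEC =====
def Spec_count_consecutive_substr (main_str : String) (substr : String) (out : Int) : Prop := out = count_consecutive_substr_alt main_str substr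
instance (main_str : String) (substr : String) (out : Int) : Decidable (Spec_count_consecutive_substr main_str substr out) := by unfold Spec_count_consecutive_substr; infer_instance

-- ===== CLAIM (what is proved, stated in full; the proofs are below) =====
def Claim_equal_count_consecutive_substr : Prop := ∀ (main_str : String) (substr : String), Dom_count_consecutive_substr main_str substr → Spec_count_consecutive_substr main_str substr (count_consecutive_substr main_str substr)

-- ===== LEMMAS AND PROOFS =====

-- a nonempty prefix of (l.drop i) forces i + sub.length ≤ l.length
theorem pvPrefix_bound (l sub : List Char) (i : Nat) (hs : sub ≠ [])
    (h : sub.isPrefixOf (l.drop i) = true) : i + sub.length ≤ l.length := by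
  have hp : sub <+: l.drop i := List.isPrefixOf_iff_prefix.mp h
  have hl : sub.length ≤ (l.drop i).length := hp.length_le
  have hk : 0 < sub.length := List.length_pos_iff.mpr hs
  simp [List.length_drop] at hl
  omega

-- fuel irrelevance: any two sufficient fuels give the same findFrom result
theorem findFrom_fuel (l sub : List Char) (f g j : Nat)
    (hf : l.length < f + j) (hg : l.length < g + j) :
    findFrom l sub f j = findFrom l sub g j := by
  induction f generalizing g j with
  | zero =>
    cases g with
    | zero => rfl
    | succ g =>
      rw [findFrom, findFrom]
      have : ¬ (j + sub.length ≤ l.length) := by omega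
      simp [this]
  | succ f ih =>
    cases g with
    | zero =>
      rw [findFrom, findFrom]
      have : ¬ (j + sub.length ≤ l.length) := by omega
      simp [this]
    | succ g =>
      rw [findFrom, findFrom]
      by_cases hb : j + sub.length ≤ l.length
      · simp only [if_pos hb]
        by_cases hm : sub.isPrefixOf (l.drop j) = true
        · simp [hm]
        · simp only [hm, Bool.false_eq_true, if_false]
          exact ih g (j + 1) (by omega) (by omega)
      · simp [hb]

-- fuel irrelevance for loopA
theorem loopA_fuel (l sub : List Char) (hs : sub ≠ []) (f g i maxc cnt : Nat)
    (hf : l.length < f + i) (hg : l.length < g + i) :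
    loopA l sub f i maxc cnt = loopA l sub g i maxc cnt := by
  induction f generalizing g i maxc cnt with
  | zero =>
    cases g with
    | zero => rfl
    | succ g =>
      rw [loopA, loopA]
      have : ¬ (i + sub.length ≤ l.length) := by
        have hk : 0 < sub.length := List.length_pos_iff.mpr hs
        omega
      simp [this]
  | succ f ih =>
    cases g with
    | zero =>
      rw [loopA, loopA]
      have : ¬ (i + sub.length ≤ l.length) := by
        have hk : 0 < sub.length := List.length_pos_iff.mpr hs
        omega
      simp [this]
    | succ g =>
      rw [loopA, loopA]
      by_cases hb : i + sub.length ≤ l.length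
      · simp only [if_pos hb]
        have hk : 0 < sub.length := List.length_pos_iff.mpr hs
        by_cases hm : sub.isPrefixOf (l.drop i) = true
        · simp only [hm, if_true]
          exact ih g (i + sub.length) maxc (cnt + 1) (by omega) (by omega)
        · simp only [hm, Bool.false_eq_true, if_false]
          exact ih g (i + 1) (Nat.max maxc cnt) 0 (by omega) (by omega)
      · simp [hb]

-- fuel irrelevance for runB
theorem runB_fuel (l sub : List Char) (hs : sub ≠ []) (f g i cnt : Nat)
    (hf : l.length < f + i) (hg : l.length < g + i) :
    runB l sub f i cnt = runB l sub g i cnt := by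
  induction f generalizing g i cnt with
  | zero =>
    cases g with
    | zero => rfl
    | succ g =>
      rw [runB, runB]
      have : ¬ (sub.isPrefixOf (l.drop i) = true) := by
        intro hm
        have := pvPrefix_bound l sub i hs hm
        have hk : 0 < sub.length := List.length_pos_iff.mpr hs
        omega
      simp [this]
  | succ f ih =>
    cases g with
    | zero =>
      rw [runB, runB]
      have : ¬ (sub.isPrefixOf (l.drop i) = true) := by
        intro hm
        have := pvPrefix_bound l sub i hs hm
        have hk : 0 < sub.length := List.length_pos_iff.mpr hs
        omega
      simp [this]
    | succ g =>
      rw [runB, runB]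
      by_cases hm : sub.isPrefixOf (l.drop i) = true
      · simp only [hm, if_true]
        have := pvPrefix_bound l sub i hs hm
        have hk : 0 < sub.length := List.length_pos_iff.mpr hs
        exact ih g (i + sub.length) (cnt + 1) (by omega) (by omega)
      · simp [hm]

-- findFrom only returns positions ≥ its start
theorem findFrom_ge (l sub : List Char) (f j p : Nat)
    (h : findFrom l sub f j = some p) : j ≤ p := by
  induction f generalizing j with
  | zero => simp [findFrom] at h
  | succ f ih =>
    rw [findFrom] at h
    by_cases hb : j + sub.length ≤ l.length
    · simp only [if_pos hb] at h
      by_cases hm : sub.isPrefixOf (l.drop j) = true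
      · simp [hm] at h; omega
      · simp only [hm, Bool.false_eq_true, if_false] at h
        have := ih (j + 1) h
        omega
    · simp [hb] at h

-- findFrom only returns match positions
theorem findFrom_match (l sub : List Char) (f j p : Nat)
    (h : findFrom l sub f j = some p) : sub.isPrefixOf (l.drop p) = true := by
  induction f generalizing j with
  | zero => simp [findFrom] at h
  | succ f ih =>
    rw [findFrom] at h
    by_cases hb : j + sub.length ≤ l.length
    · simp only [if_pos hb] at h
      by_cases hm : sub.isPrefixOf (l.drop j) = true
      · simp [hm] at h; exact h ▸ hm
      · simp only [hm, Bool.false_eq_true, if_false] at h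
        exact ih (j + 1) h
    · simp [hb] at h

-- runB never moves the index backwards
theorem runB_snd_ge (l sub : List Char) (f i cnt : Nat) : i ≤ (runB l sub f i cnt).2 := by
  induction f generalizing i cnt with
  | zero => simp [runB]
  | succ f ih =>
    rw [runB]
    by_cases hm : sub.isPrefixOf (l.drop i) = true
    · simp only [hm, if_true]
      have := ih (i + sub.length) (cnt + 1)
      omega
    · simp [hm]

-- from a match position, runB strictly advances
theorem runB_snd_gt (l sub : List Char) (hs : sub ≠ []) (f i cnt : Nat)
    (hfu : l.length < f + i) (h : sub.isPrefixOf (l.drop i) = true) :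
    i < (runB l sub f i cnt).2 := by
  have hb := pvPrefix_bound l sub i hs h
  have hk : 0 < sub.length := List.length_pos_iff.mpr hs
  cases f with
  | zero => omega
  | succ f =>
    rw [runB]
    simp only [h, if_true]
    have := runB_snd_ge l sub f (i + sub.length) (cnt + 1)
    omega

-- runB stops exactly at a mismatch position
theorem runB_mismatch (l sub : List Char) (hs : sub ≠ []) (f i cnt : Nat)
    (hfu : l.length < f + i) :
    sub.isPrefixOf (l.drop (runB l sub f i cnt).2) = false := by
  induction f generalizing i cnt with
  | zero =>
    have hd : l.drop i = [] := List.drop_eq_nil_of_le (by omega)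
    rw [runB]
    simp only [hd]
    cases sub with
    | nil => exact absurd rfl hs
    | cons a t => simp [List.isPrefixOf]
  | succ f ih =>
    rw [runB]
    by_cases hm : sub.isPrefixOf (l.drop i) = true
    · simp only [hm, if_true]
      have hb := pvPrefix_bound l sub i hs hm
      have hk : 0 < sub.length := List.length_pos_iff.mpr hs
      exact ih (i + sub.length) (cnt + 1) (by omega)
    · rw [if_neg hm]
      exact (Bool.not_eq_true _) ▸ hm

-- A from a position with no further match just folds cnt into maxc and stops
theorem loopA_none (l sub : List Char) (f i maxc cnt : Nat)
    (hfu : l.length < f + i)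
    (h : findFrom l sub (l.length + 1) i = none) :
    loopA l sub f i maxc cnt = Nat.max maxc cnt := by
  induction f generalizing i maxc cnt with
  | zero => rfl
  | succ f ih =>
    rw [loopA]
    by_cases hb : i + sub.length ≤ l.length
    · simp only [if_pos hb]
      rw [findFrom] at h
      simp only [if_pos hb] at h
      by_cases hm : sub.isPrefixOf (l.drop i) = true
      · simp [hm] at h
      · simp only [hm, Bool.false_eq_true, if_false] at h ⊢
        have h' : findFrom l sub (l.length + 1) (i + 1) = none := by
          rw [findFrom_fuel l sub (l.length + 1) l.length (i + 1) (by omega) (by omega)]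
          exact h
        rw [ih (i + 1) (Nat.max maxc cnt) 0 (by omega) h']
        simp
    · simp [hb]

-- A with a zero run counter skips forward to the next match position unchanged
theorem loopA_skip (l sub : List Char) (hs : sub ≠ []) (f i p maxc : Nat)
    (hfu : l.length < f + i)
    (h : findFrom l sub (l.length + 1) i = some p) :
    loopA l sub f i maxc 0 = loopA l sub (l.length + 1) p maxc 0 := by
  induction f generalizing i maxc with
  | zero =>
    rw [findFrom] at h
    have : ¬ (i + sub.length ≤ l.length) := by omega
    simp [this] at h
  | succ f ih =>
    rw [findFrom] at h
    by_cases hb : i + sub.length ≤ l.length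
    · simp only [if_pos hb] at h
      by_cases hm : sub.isPrefixOf (l.drop i) = true
      · simp [hm] at h
        subst h
        exact loopA_fuel l sub hs (f + 1) (l.length + 1) i maxc 0 hfu (by omega)
      · simp only [hm, Bool.false_eq_true, if_false] at h
        have h' : findFrom l sub (l.length + 1) (i + 1) = some p := by
          rw [findFrom_fuel l sub (l.length + 1) l.length (i + 1) (by omega) (by omega)]
          exact h
        rw [loopA]
        simp only [if_pos hb, hm, Bool.false_eq_true, if_false, Nat.max_zero]
        exact ih (i + 1) maxc (by omega) h'
    · simp [hb] at h

-- A absorbs a whole back-to-back run exactly as runB does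
theorem loopA_run (l sub : List Char) (hs : sub ≠ []) (f i maxc cnt : Nat)
    (hfu : l.length < f + i) :
    loopA l sub f i maxc cnt
      = loopA l sub (l.length + 1) (runB l sub (l.length + 1) i cnt).2 maxc
          (runB l sub (l.length + 1) i cnt).1 := by
  induction f generalizing i cnt with
  | zero =>
    have hm : ¬ (sub.isPrefixOf (l.drop i) = true) := by
      intro hm
      have := pvPrefix_bound l sub i hs hm
      have hk : 0 < sub.length := List.length_pos_iff.mpr hs
      omega
    rw [runB]
    simp only [hm, Bool.false_eq_true, if_false]
    exact loopA_fuel l sub hs 0 (l.length + 1) i maxc cnt hfu (by omega)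
  | succ f ih =>
    by_cases hm : sub.isPrefixOf (l.drop i) = true
    · have hb := pvPrefix_bound l sub i hs hm
      have hk : 0 < sub.length := List.length_pos_iff.mpr hs
      rw [loopA]
      simp only [if_pos hb, hm, if_true]
      rw [runB]
      simp only [hm, if_true]
      rw [runB_fuel l sub hs l.length (l.length + 1) (i + sub.length) (cnt + 1)
        (by omega) (by omega)]
      exact ih (i + sub.length) (cnt + 1) (by omega)
    · rw [runB]
      simp only [hm, Bool.false_eq_true, if_false]
      exact loopA_fuel l sub hs (f + 1) (l.length + 1) i maxc cnt hfu (by omega)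

-- A at a mismatch position: fold cnt into maxc and continue from the next match (if any)
theorem loopA_at_mismatch (l sub : List Char) (hs : sub ≠ []) (f i maxc cnt : Nat)
    (hfu : l.length < f + i)
    (hm : sub.isPrefixOf (l.drop i) = false) :
    loopA l sub f i maxc cnt
      = (match findFrom l sub (l.length + 1) i with
         | none => Nat.max maxc cnt
         | some p => loopA l sub (l.length + 1) p (Nat.max maxc cnt) 0) := by
  by_cases hb : i + sub.length ≤ l.length
  · cases f with
    | zero => omega
    | succ f =>
      have hfi : findFrom l sub (l.length + 1) i = findFrom l sub (l.length + 1) (i + 1) := by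
        rw [findFrom]
        simp only [if_pos hb, hm, Bool.false_eq_true, if_false]
        exact findFrom_fuel l sub l.length (l.length + 1) (i + 1) (by omega) (by omega)
      rw [loopA]
      simp only [if_pos hb, hm, Bool.false_eq_true, if_false]
      rw [hfi]
      cases hf : findFrom l sub (l.length + 1) (i + 1) with
      | none =>
        rw [loopA_none l sub f (i + 1) (Nat.max maxc cnt) 0 (by omega) hf]
        simp
      | some p =>
        exact loopA_skip l sub hs f (i + 1) p (Nat.max maxc cnt) (by omega) hf
  · have hfi : findFrom l sub (l.length + 1) i = none := by
      rw [findFrom]; simp [hb]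
    rw [hfi]
    cases f with
    | zero => rfl
    | succ f => rw [loopA]; simp [hb]

-- main simulation: from a match position, A's scan computes exactly B's outer loop
theorem loopA_outer (l sub : List Char) (hs : sub ≠ []) (f p maxc : Nat)
    (hp : sub.isPrefixOf (l.drop p) = true) (hfu : l.length < f + p) :
    loopA l sub (l.length + 1) p maxc 0 = outerB l sub f (some p) maxc := by
  induction f generalizing p maxc with
  | zero =>
    have := pvPrefix_bound l sub p hs hp
    have hk : 0 < sub.length := List.length_pos_iff.mpr hs
    omega
  | succ f ih =>
    rw [outerB]
    rw [loopA_run l sub hs (l.length + 1) p maxc 0 (by omega)]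
    rw [loopA_at_mismatch l sub hs (l.length + 1) _ maxc _ (by
        have := runB_snd_ge l sub (l.length + 1) p 0
        omega)
      (runB_mismatch l sub hs (l.length + 1) p 0 (by omega))]
    cases hf : findFrom l sub (l.length + 1) (runB l sub (l.length + 1) p 0).2 with
    | none =>
      cases f with
      | zero => rfl
      | succ f => rfl
    | some p' =>
      have hge := findFrom_ge l sub (l.length + 1) _ p' hf
      have hgt := runB_snd_gt l sub hs (l.length + 1) p 0 (by omega) hp
      exact ih p' (Nat.max maxc (runB l sub (l.length + 1) p 0).1)
        (findFrom_match l sub (l.length + 1) _ p' hf) (by omega)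

-- ===== VERDICT (by name: the statement is the Claim_ definition above) =====
theorem count_consecutive_substr_spec : Claim_equal_count_consecutive_substr := by
  intro main_str substr _
  unfold Spec_count_consecutive_substr count_consecutive_substr count_consecutive_substr_alt
  by_cases h : main_str.toList = [] ∨ substr.toList = []
  · rw [if_pos h, if_pos h]
  · rw [if_neg h, if_neg h]
    have hs : substr.toList ≠ [] := fun he => h (Or.inr he)
    cases hf : findFrom main_str.toList substr.toList (main_str.toList.length + 1) 0 with
    | none =>
      rw [loopA_none main_str.toList substr.toList (main_str.toList.length + 1) 0 0 0
        (by omega) hf]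
      rfl
    | some p =>
      rw [loopA_skip main_str.toList substr.toList hs (main_str.toList.length + 1) 0 p 0
          (by omega) hf,
        loopA_outer main_str.toList substr.toList hs (main_str.toList.length + 1) p 0
          (findFrom_match main_str.toList substr.toList (main_str.toList.length + 1) 0 p hf)
          (by omega)]
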